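-- pv_equiv track=rewrite | github.com/nmi21/euler | 131/main.py | get_cube_diffs
-- ===== SOURCE A (Python) =====
-- def get_cube_diffs(limit):
--     def cube_diff(x):
--         return x**3 - (x - 1)**3
--
--     list_cube_diffs = []
--     a = 2
--     while cube_diff(a) < limit:
--         list_cube_diffs.append(cube_diff(a))
--         a += 1
--
--     return list_cube_diffs
-- ===== SOURCE B (Python) =====
-- def get_cube_diffs(limit):
--     if limit <= 7:
--         return []
--     # largest a with 3a^2-3a+1 < limit satisfies (6a-3)^2 <= 12*limit-15
--     n = 12 * limit - 15
--     lo, hi = 0, n + 1          # integer sqrt of n by binary search (module has no imports)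
--     while lo + 1 < hi:
--         mid = (lo + hi) // 2
--         if mid * mid <= n:
--             lo = mid
--         else:
--             hi = mid
--     a_max = (lo + 3) // 6
--     return [3 * a * a - 3 * a + 1 for a in range(2, a_max + 1)]
-- ===== Notes on version B (the rewrite author's own statement) =====
-- stated objective: alternative
-- what changed: Replaces the condition-driven while loop with a closed-form bound: the largest valid a is derived from the integer square root of the loop condition's discriminant (computed by binary search, no floats), then the list is produced by a flat range comprehension with no per-step comparison against limit.
import Mathlib
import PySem

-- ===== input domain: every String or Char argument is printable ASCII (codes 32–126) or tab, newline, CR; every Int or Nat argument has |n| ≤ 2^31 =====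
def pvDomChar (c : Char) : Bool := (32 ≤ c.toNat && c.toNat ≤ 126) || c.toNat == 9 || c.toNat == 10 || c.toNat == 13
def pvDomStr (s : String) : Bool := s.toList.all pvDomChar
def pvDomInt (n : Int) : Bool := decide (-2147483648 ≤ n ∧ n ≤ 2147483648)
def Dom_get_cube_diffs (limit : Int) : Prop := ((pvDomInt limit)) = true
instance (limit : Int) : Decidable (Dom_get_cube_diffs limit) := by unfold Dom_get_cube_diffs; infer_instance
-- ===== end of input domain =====

-- B replaces the condition-driven while loop by a closed-form bound (integer sqrt by
-- binary search, no floats) followed by a flat range comprehension; objective: alternative.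

-- ===== PORT A =====
def pvCubeDiff (x : Int) : Int := x ^ 3 - (x - 1) ^ 3

-- cube_diff only grows past its argument; needed for the while loop's termination
lemma pvCubeDiff_self_le (a : Int) : a ≤ pvCubeDiff a := by
  unfold pvCubeDiff
  rcases le_total 1 a with h | h
  · nlinarith
  · have h0 : a ≤ 0 ∨ a = 1 := by omega
    rcases h0 with h0 | rfl
    · nlinarith
    · norm_num

def pvLoopA (limit a : Int) (acc : List Int) : List Int :=
  if h : pvCubeDiff a < limit then pvLoopA limit (a + 1) (acc ++ [pvCubeDiff a]) else acc
termination_by (limit - a).toNat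
decreasing_by
  have := pvCubeDiff_self_le a
  omega

def get_cube_diffs (limit : Int) : List Int := pvLoopA limit 2 []

-- ===== PORT B =====
-- while lo + 1 < hi: mid = (lo+hi)//2; if mid*mid <= n: lo = mid else hi = mid
def pvBsearch (n lo hi : Int) : Int :=
  if h : lo + 1 < hi then
    let mid := PySem.Int.floordiv (lo + hi) 2
    if mid * mid ≤ n then pvBsearch n mid hi else pvBsearch n lo mid
  else lo
termination_by (hi - lo).toNat
decreasing_by
  · have h1 : lo + 1 ≤ PySem.Int.floordiv (lo + hi) 2 :=
      (PySem.Int.le_floordiv_iff_mul_le (by omega)).mpr (by omega)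
    omega
  · have h2 : PySem.Int.floordiv (lo + hi) 2 < hi :=
      (PySem.Int.floordiv_lt_iff_lt_mul (by omega)).mpr (by omega)
    have h1 : lo + 1 ≤ PySem.Int.floordiv (lo + hi) 2 :=
      (PySem.Int.le_floordiv_iff_mul_le (by omega)).mpr (by omega)
    omega

def get_cube_diffs_alt (limit : Int) : List Int :=
  if limit ≤ 7 then []
  else
    let n := 12 * limit - 15
    let lo := pvBsearch n 0 (n + 1)
    let a_max := PySem.Int.floordiv (lo + 3) 6
    (PySem.List.pyRange 2 (a_max + 1) 1).map (fun a => 3 * a * a - 3 * a + 1)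

-- ===== PRECONDITION & SPEC =====
def Spec_get_cube_diffs (limit : Int) (out : List Int) : Prop := out = get_cube_diffs_alt limit
instance (limit : Int) (out : List Int) : Decidable (Spec_get_cube_diffs limit out) := by unfold Spec_get_cube_diffs; infer_instance

-- ===== CLAIM (what is proved, stated in full; the proofs are below) =====
def Claim_equal_get_cube_diffs : Prop := ∀ (limit : Int), Dom_get_cube_diffs limit → Spec_get_cube_diffs limit (get_cube_diffs limit)

-- ===== LEMMAS AND PROOFS =====

-- the binary search returns the integer square root of n (for 0 ≤ n)
lemma pvBsearch_spec (n : Int) : ∀ (k : Nat) (lo hi : Int), (hi - lo).toNat = k →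
    0 ≤ lo → lo < hi → lo * lo ≤ n → n < hi * hi →
    0 ≤ pvBsearch n lo hi ∧ pvBsearch n lo hi * pvBsearch n lo hi ≤ n ∧
      n < (pvBsearch n lo hi + 1) * (pvBsearch n lo hi + 1) := by
  intro k
  induction k using Nat.strong_induction_on with
  | _ k ih =>
    intro lo hi hk hlo hlt hlosq hhisq
    rw [pvBsearch]
    by_cases hstep : lo + 1 < hi
    · have hmid1 : lo + 1 ≤ PySem.Int.floordiv (lo + hi) 2 :=
        (PySem.Int.le_floordiv_iff_mul_le (by omega)).mpr (by omega)
      have hmid2 : PySem.Int.floordiv (lo + hi) 2 < hi :=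
        (PySem.Int.floordiv_lt_iff_lt_mul (by omega)).mpr (by omega)
      simp only [dif_pos hstep]
      set mid := PySem.Int.floordiv (lo + hi) 2 with hmiddef
      by_cases hc : mid * mid ≤ n
      · rw [if_pos hc]
        exact ih (hi - mid).toNat (by omega) mid hi rfl (by omega) (by omega) hc hhisq
      · rw [if_neg hc]
        exact ih (mid - lo).toNat (by omega) lo mid rfl hlo (by omega) hlosq (by omega)
    · simp only [dif_neg hstep]
      have hhi : hi = lo + 1 := by omega
      subst hhi
      exact ⟨hlo, hlosq, hhisq⟩

-- the computed bound a_max characterises the loop condition: for a ≥ 1,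
-- 3a²-3a+1 < limit ↔ a ≤ a_max
lemma a_max_iff (limit s : Int) (hs0 : 0 ≤ s)
    (hs1 : s * s ≤ 12 * limit - 15) (hs2 : 12 * limit - 15 < (s + 1) * (s + 1)) :
    ∀ a : Int, 1 ≤ a →
      (pvCubeDiff a < limit ↔ a ≤ PySem.Int.floordiv (s + 3) 6) := by
  intro a ha
  have hcd : pvCubeDiff a = 3 * a * a - 3 * a + 1 := by unfold pvCubeDiff; ring
  rw [hcd, PySem.Int.le_floordiv_iff_mul_le (by omega)]
  constructor
  · intro h
    -- (6a-3)² ≤ 12·limit - 15, hence 6a-3 ≤ s, hence 6a ≤ s+3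
    have hsq : (6 * a - 3) * (6 * a - 3) ≤ 12 * limit - 15 := by nlinarith
    by_contra hc
    have h1 : s + 1 ≤ 6 * a - 3 := by omega
    nlinarith
  · intro h
    have h1 : 0 ≤ 6 * a - 3 := by omega
    have h2 : 6 * a - 3 ≤ s := by omega
    have hsq : (6 * a - 3) * (6 * a - 3) ≤ 12 * limit - 15 := by nlinarith
    nlinarith

-- A's while loop, under the a_max characterisation, produces the range comprehension
lemma pvLoopA_eq (limit amax : Int)
    (hiff : ∀ a : Int, 2 ≤ a → (pvCubeDiff a < limit ↔ a ≤ amax)) :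
    ∀ (k : Nat) (a : Int) (acc : List Int), (amax + 1 - a).toNat = k → 2 ≤ a →
      pvLoopA limit a acc =
        acc ++ (PySem.List.pyRange a (amax + 1) 1).map (fun x => 3 * x * x - 3 * x + 1) := by
  intro k
  induction k with
  | zero =>
    intro a acc hk ha
    have hgt : ¬ pvCubeDiff a < limit := by
      rw [hiff a ha]; omega
    rw [pvLoopA, dif_neg hgt, PySem.List.pyRange_one_eq_nil (by omega)]
    simp
  | succ k ih =>
    intro a acc hk ha
    have hle : a ≤ amax := by omega
    have hlt : pvCubeDiff a < limit := (hiff a ha).mpr hle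
    have hk' : (amax + 1 - (a + 1)).toNat = k := by omega
    rw [pvLoopA, dif_pos hlt, ih (a + 1) (acc ++ [pvCubeDiff a]) hk' (by omega),
      show PySem.List.pyRange a (amax + 1) 1 = a :: PySem.List.pyRange (a + 1) (amax + 1) 1
        from PySem.List.pyRange_one_cons (by omega)]
    have hcd : pvCubeDiff a = 3 * a * a - 3 * a + 1 := by unfold pvCubeDiff; ring
    simp [hcd]

-- ===== VERDICT (by name: the statement is the Claim_ definition above) =====
theorem get_cube_diffs_spec : Claim_equal_get_cube_diffs := by
  intro limit _
  unfold Spec_get_cube_diffs get_cube_diffs get_cube_diffs_alt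
  by_cases hlim : limit ≤ 7
  · rw [if_pos hlim, pvLoopA]
    have h7 : pvCubeDiff 2 = 7 := by decide
    rw [dif_neg (by omega)]
  · rw [if_neg hlim]
    have h8 : 8 ≤ limit := by omega
    set n : Int := 12 * limit - 15 with hn
    have hspec := pvBsearch_spec n (n + 1 - 0).toNat 0 (n + 1) rfl le_rfl (by omega)
      (by omega) (by nlinarith)
    set s : Int := pvBsearch n 0 (n + 1) with hs
    obtain ⟨hs0, hs1, hs2⟩ := hspec
    exact pvLoopA_eq limit (PySem.Int.floordiv (s + 3) 6)
      (fun a ha => a_max_iff limit s hs0 hs1 hs2 a (by omega))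
      (PySem.Int.floordiv (s + 3) 6 + 1 - 2).toNat 2 [] rfl (by omega)
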